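-- pv_equiv track=rewrite | github.com/datacommonsorg/website | server/routes/shared_api/autocomplete/helpers.py | off_by_one_letter
-- ===== SOURCE A (Python) =====
-- from typing import Dict, List
--
-- def bag_of_letters(text: str) -> Dict:
--   """Creates a bag-of-letters representation of a given string."""
--   bag = {}
--   for char in text.lower():
--     if char.isalpha():
--       bag[char] = bag.get(char, 0) + 1
--   return bag
--
-- def off_by_one_letter(str1_word: str, name_word: str) -> bool:
--   """Function to do off by one check."""
--   offby = 0
--   str1_bag = bag_of_letters(str1_word)
--   str2_bag = bag_of_letters(name_word)
--   for key, value in str1_bag.items():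
--     if key in str2_bag:
--       offby += abs(str2_bag[key] - value)
--     else:
--       offby += value
--
--   for key, value in str2_bag.items():
--     if key not in str1_bag:
--       offby += value
--
--   return offby <= 1
-- ===== SOURCE B (Python) =====
-- def off_by_one_letter(str1_word: str, name_word: str) -> bool:
--   """Off-by-one check: sort both letter lists, count multiset matches with two pointers."""
--   a = sorted(c for c in str1_word.lower() if c.isalpha())
--   b = sorted(c for c in name_word.lower() if c.isalpha())
--   i = j = common = 0
--   while i < len(a) and j < len(b):
--     if a[i] == b[j]:
--       common += 1
--       i += 1
--       j += 1
--     elif a[i] < b[j]: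
--       i += 1
--     else:
--       j += 1
--   return len(a) + len(b) - 2 * common <= 1
-- ===== Notes on version B (the rewrite author's own statement) =====
-- stated objective: alternative
-- what changed: Replaces the two letter-count dicts and two dict-comparison loops with sorting both letter sequences and counting multiset matches by a two-pointer merge, then checking len(a)+len(b)-2*common <= 1 (equal to the L1 bag distance since sum|ca-cb| = sum(ca+cb-2*min)).
import Mathlib
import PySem

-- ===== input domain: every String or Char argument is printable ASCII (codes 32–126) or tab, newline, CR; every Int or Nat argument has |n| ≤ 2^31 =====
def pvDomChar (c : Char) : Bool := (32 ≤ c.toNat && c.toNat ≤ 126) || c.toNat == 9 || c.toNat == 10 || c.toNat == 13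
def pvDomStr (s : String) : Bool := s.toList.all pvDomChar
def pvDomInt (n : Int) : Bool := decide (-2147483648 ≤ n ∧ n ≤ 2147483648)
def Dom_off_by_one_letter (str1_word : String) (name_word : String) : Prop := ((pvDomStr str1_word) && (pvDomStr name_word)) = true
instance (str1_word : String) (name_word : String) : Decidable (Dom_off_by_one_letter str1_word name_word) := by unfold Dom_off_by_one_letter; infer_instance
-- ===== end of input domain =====

-- B replaces A's two letter-count dicts and two comparison loops by sorting both
-- letter sequences and counting multiset matches with a two-pointer merge
-- (objective: alternative algorithm, same result).

-- ===== PORT A =====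
def bag_of_letters (text : String) : PySem.Dict Char Int :=
  (PySem.Chars.lower text.toList).foldl
    (fun bag c => if PySem.Chars.isalpha c then bag.insert c (bag.getD c 0 + 1) else bag)
    PySem.Dict.empty

def off_by_one_letter (str1_word : String) (name_word : String) : Bool :=
  let str1_bag := bag_of_letters str1_word
  let str2_bag := bag_of_letters name_word
  let offby : Int :=
    str1_bag.items.foldl
      (fun acc kv =>
        if str2_bag.contains kv.1 then acc + |str2_bag.getD kv.1 0 - kv.2|
        else acc + kv.2) 0
  let offby :=
    str2_bag.items.foldl
      (fun acc kv => if !str1_bag.contains kv.1 then acc + kv.2 else acc) offby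
  decide (offby ≤ 1)

-- ===== PORT B =====
-- the two-pointer while loop of Source B, as the obvious structural recursion over the
-- unscanned suffixes of the two sorted lists (i/j advance = dropping a head)
def pvMatchLoop : List Char → List Char → Int → Int
  | [], _, common => common
  | _ :: _, [], common => common
  | x :: xs, y :: ys, common =>
      if x == y then pvMatchLoop xs ys (common + 1)
      else if x < y then pvMatchLoop xs (y :: ys) common
      else pvMatchLoop (x :: xs) ys common
termination_by a b _ => a.length + b.length
decreasing_by all_goals (simp only [List.length_cons]; omega)

def off_by_one_letter_alt (str1_word : String) (name_word : String) : Bool :=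
  let a := PySem.List.sorted ((PySem.Chars.lower str1_word.toList).filter PySem.Chars.isalpha) (fun c => c) false
  let b := PySem.List.sorted ((PySem.Chars.lower name_word.toList).filter PySem.Chars.isalpha) (fun c => c) false
  decide ((a.length : Int) + (b.length : Int) - 2 * pvMatchLoop a b 0 ≤ 1)

-- ===== PRECONDITION & SPEC =====
def Spec_off_by_one_letter (str1_word : String) (name_word : String) (out : Bool) : Prop := out = off_by_one_letter_alt str1_word name_word
instance (str1_word : String) (name_word : String) (out : Bool) : Decidable (Spec_off_by_one_letter str1_word name_word out) := by unfold Spec_off_by_one_letter; infer_instance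

-- ===== CLAIM (what is proved, stated in full; the proofs are below) =====
def Claim_equal_off_by_one_letter : Prop := ∀ (str1_word : String) (name_word : String), Dom_off_by_one_letter str1_word name_word → Spec_off_by_one_letter str1_word name_word (off_by_one_letter str1_word name_word)

-- ===== LEMMAS AND PROOFS =====

-- the alphabetic characters of s.lower(), in order
def pvLA (s : String) : List Char :=
  (PySem.Chars.lower s.toList).filter PySem.Chars.isalpha

theorem pvLA_def (s : String) :
    (PySem.Chars.lower s.toList).filter PySem.Chars.isalpha = pvLA s := rfl

theorem pv_bag_eq (s : String) : bag_of_letters s = PySem.Dict.counter (pvLA s) := by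
  unfold bag_of_letters pvLA
  rw [PySem.List.foldl_if_eq_foldl_filter]
  exact PySem.Dict.foldl_insert_getD_add_one_eq_counter _

-- sum over an ite-map is a sum over the filtered complement
theorem pv_sum_ite (l : List Char) (p : Char → Bool) (F : Char → Int) :
    (l.map (fun k => if p k then 0 else F k)).sum
      = ((l.filter (fun k => !p k)).map F).sum := by
  induction l with
  | nil => simp
  | cons h t ih =>
      by_cases hp : p h <;> simp [hp, ih]

-- A's value is the L1 distance over the union of letter keys, compared with 1
theorem off_by_one_letter_eq_sum (s1 s2 : String) :
    off_by_one_letter s1 s2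
      = decide ((((PySem.Set.ofList (pvLA s1))
            ++ (PySem.Set.ofList (pvLA s2)).filter
                 (fun k => !(PySem.Set.ofList (pvLA s1)).contains k)).map
            (fun k => |((pvLA s1).count k : Int) - ((pvLA s2).count k : Int)|)).sum ≤ 1) := by
  unfold off_by_one_letter
  rw [pv_bag_eq, pv_bag_eq]
  set S1 := PySem.Set.ofList (pvLA s1) with hS1
  set S2 := PySem.Set.ofList (pvLA s2) with hS2
  set F : Char → Int := fun k => |((pvLA s1).count k : Int) - ((pvLA s2).count k : Int)| with hF
  have h1 : ∀ (init : Int),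
      (PySem.Dict.counter (pvLA s1)).items.foldl
        (fun acc kv =>
          if (PySem.Dict.counter (pvLA s2)).contains kv.1 then
            acc + |(PySem.Dict.counter (pvLA s2)).getD kv.1 0 - kv.2|
          else acc + kv.2) init
        = init + (S1.map F).sum := by
    intro init
    have hcg : ∀ (acc : Int) (kv : Char × Int),
        (if (PySem.Dict.counter (pvLA s2)).contains kv.1 then
            acc + |(PySem.Dict.counter (pvLA s2)).getD kv.1 0 - kv.2|
          else acc + kv.2)
        = acc + (if (PySem.Dict.counter (pvLA s2)).contains kv.1 then
            |(PySem.Dict.counter (pvLA s2)).getD kv.1 0 - kv.2| else kv.2) := by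
      intro acc kv; split_ifs <;> rfl
    rw [PySem.List.foldl_congr_mem _ _ _ _ (fun acc kv _ => hcg acc kv),
        PySem.List.foldl_add, PySem.Dict.items_counter]
    congr 1
    rw [List.map_map]
    refine congrArg List.sum ?_
    refine List.map_congr_left ?_
    intro k hk
    simp only [Function.comp, PySem.Dict.getD_counter, PySem.Dict.contains_counter]
    by_cases h2 : k ∈ pvLA s2
    · simp [h2, hF, abs_sub_comm]
    · have hc2 : (pvLA s2).count k = 0 := List.count_eq_zero.mpr h2
      simp [h2, hF, hc2]
  have h2 : ∀ (init : Int),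
      (PySem.Dict.counter (pvLA s2)).items.foldl
        (fun acc kv =>
          if !(PySem.Dict.counter (pvLA s1)).contains kv.1 then acc + kv.2 else acc) init
        = init + ((S2.filter (fun k => !S1.contains k)).map F).sum := by
    intro init
    have hcg : ∀ (acc : Int) (kv : Char × Int),
        (if !(PySem.Dict.counter (pvLA s1)).contains kv.1 then acc + kv.2 else acc)
        = acc + (if (PySem.Dict.counter (pvLA s1)).contains kv.1 then 0 else kv.2) := by
      intro acc kv
      by_cases h : (PySem.Dict.counter (pvLA s1)).contains kv.1 <;> simp [h]
    rw [PySem.List.foldl_congr_mem _ _ _ _ (fun acc kv _ => hcg acc kv),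
        PySem.List.foldl_add, PySem.Dict.items_counter]
    congr 1
    rw [List.map_map]
    have hfun : ((fun kv : Char × Int =>
          if (PySem.Dict.counter (pvLA s1)).contains kv.1 then 0 else kv.2)
            ∘ (fun k => (k, ((pvLA s2).count k : Int))))
        = fun k => if (pvLA s1).contains k then 0 else ((pvLA s2).count k : Int) := by
      funext k; simp [Function.comp, PySem.Dict.contains_counter]
    rw [hfun, pv_sum_ite]
    have hfil : S2.filter (fun k => !(pvLA s1).contains k)
        = S2.filter (fun k => !S1.contains k) := by
      refine List.filter_congr ?_
      intro k _
      have : S1.contains k = (pvLA s1).contains k := by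
        simp [hS1, PySem.Set.contains_eq_listContains, PySem.Set.mem_ofList]
      rw [this]
    rw [hfil]
    refine congrArg List.sum ?_
    refine List.map_congr_left ?_
    intro k hk
    have hk1 : k ∉ pvLA s1 := by
      have := (List.mem_filter.mp hk).2
      simpa [hS1, PySem.Set.contains_eq_listContains] using this
    have hc1 : (pvLA s1).count k = 0 := List.count_eq_zero.mpr hk1
    simp [hF, hc1]
  simp only [h1, h2, zero_add, List.map_append, List.sum_append]

-- ===== multiset-intersection facts for the two-pointer loop =====

theorem pv_inter_cons_cons (a : Char) (s t : Multiset Char) :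
    ((a ::ₘ s) ∩ (a ::ₘ t)) = a ::ₘ (s ∩ t) := by
  ext x
  simp only [Multiset.count_inter, Multiset.count_cons]
  by_cases hx : x = a <;> simp [hx]

theorem pv_inter_cons_left (a : Char) (s t : Multiset Char) (h : t.count a = 0) :
    ((a ::ₘ s) ∩ t) = s ∩ t := by
  ext x
  simp only [Multiset.count_inter, Multiset.count_cons]
  by_cases hx : x = a
  · subst hx; simp [h]
  · simp [hx]

theorem pv_inter_cons_right (a : Char) (s t : Multiset Char) (h : s.count a = 0) :
    (s ∩ (a ::ₘ t)) = s ∩ t := by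
  ext x
  simp only [Multiset.count_inter, Multiset.count_cons]
  by_cases hx : x = a
  · subst hx; simp [h]
  · simp [hx]

-- on sorted inputs, the two-pointer loop counts the multiset intersection
theorem pv_matchLoop_eq (a b : List Char) (c : Int)
    (ha : a.Pairwise (· ≤ ·)) (hb : b.Pairwise (· ≤ ·)) :
    pvMatchLoop a b c = c + (((a : Multiset Char)) ∩ (b : Multiset Char)).card := by
  induction a, b, c using pvMatchLoop.induct with
  | case1 b c => simp [pvMatchLoop]
  | case2 x xs c => simp [pvMatchLoop]
  | case3 x xs y ys c heq ih =>
      have hxy : x = y := by simpa using heq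
      subst hxy
      rw [pvMatchLoop, if_pos heq]
      rw [ih (List.Pairwise.of_cons ha) (List.Pairwise.of_cons hb)]
      have hms : ((x :: xs : List Char) : Multiset Char) ∩ ((x :: ys : List Char) : Multiset Char)
          = x ::ₘ (((xs : Multiset Char)) ∩ (ys : Multiset Char)) := by
        simpa using pv_inter_cons_cons x (xs : Multiset Char) (ys : Multiset Char)
      rw [hms, Multiset.card_cons]
      omega
  | case4 x xs y ys c heq hlt ih =>
      rw [pvMatchLoop, if_neg heq, if_pos hlt]
      rw [ih (List.Pairwise.of_cons ha) hb]
      have hyall : ∀ z ∈ y :: ys, y ≤ z := by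
        intro z hz
        rcases List.mem_cons.mp hz with rfl | hz'
        · exact le_refl z
        · exact (List.pairwise_cons.mp hb).1 z hz'
      have hcnt : ((y :: ys : List Char) : Multiset Char).count x = 0 := by
        rw [Multiset.coe_count]
        refine List.count_eq_zero.mpr (fun hmem => ?_)
        exact absurd (lt_of_lt_of_le hlt (hyall x hmem)) (lt_irrefl x)
      have hms : ((x :: xs : List Char) : Multiset Char) ∩ ((y :: ys : List Char) : Multiset Char)
          = ((xs : Multiset Char)) ∩ ((y :: ys : List Char) : Multiset Char) := by
        simpa using pv_inter_cons_left x (xs : Multiset Char) _ hcnt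
      rw [hms]
  | case5 x xs y ys c heq hlt ih =>
      rw [pvMatchLoop, if_neg heq, if_neg hlt]
      rw [ih ha (List.Pairwise.of_cons hb)]
      have hne : ¬ x = y := by simpa using heq
      have hylt : y < x := by
        rcases lt_trichotomy x y with h | h | h
        · exact absurd h hlt
        · exact absurd h hne
        · exact h
      have hxall : ∀ z ∈ x :: xs, x ≤ z := by
        intro z hz
        rcases List.mem_cons.mp hz with rfl | hz'
        · exact le_refl z
        · exact (List.pairwise_cons.mp ha).1 z hz'
      have hcnt : ((x :: xs : List Char) : Multiset Char).count y = 0 := by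
        rw [Multiset.coe_count]
        refine List.count_eq_zero.mpr (fun hmem => ?_)
        exact absurd (lt_of_lt_of_le hylt (hxall y hmem)) (lt_irrefl y)
      have hms : ((x :: xs : List Char) : Multiset Char) ∩ ((y :: ys : List Char) : Multiset Char)
          = ((x :: xs : List Char) : Multiset Char) ∩ ((ys : Multiset Char)) := by
        simpa using pv_inter_cons_right y _ (ys : Multiset Char) hcnt
      rw [hms]

-- ===== summation facts =====

theorem pv_count_list (a : List Char) :
    ∑ x ∈ a.toFinset, a.count x = a.length := by
  simpa [Multiset.coe_count] using Multiset.toFinset_sum_count_eq (a : Multiset Char)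

theorem pv_sum_counts (U a : List Char) (hU : U.Nodup) (hcov : ∀ x ∈ a, x ∈ U) :
    (U.map (fun k => ((a.count k : Nat) : Int))).sum = (a.length : Int) := by
  have h1 : (U.map (fun k => ((a.count k : Nat) : Int))).sum
      = ∑ x ∈ U.toFinset, ((a.count x : Nat) : Int) :=
    (List.sum_toFinset (fun k => ((a.count k : Nat) : Int)) hU).symm
  rw [h1, ← Nat.cast_sum]
  have h3 : ∑ x ∈ U.toFinset, a.count x = ∑ x ∈ a.toFinset, a.count x := by
    refine (Finset.sum_subset ?_ ?_).symm
    · intro x hx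
      exact List.mem_toFinset.mpr (hcov x (List.mem_toFinset.mp hx))
    · intro x _ hx
      exact List.count_eq_zero.mpr (fun h => hx (List.mem_toFinset.mpr h))
  rw [h3, pv_count_list]

theorem pv_sum_mins (U a b : List Char) (hU : U.Nodup) (hcov : ∀ x ∈ a, x ∈ U) :
    (U.map (fun k => ((min (a.count k) (b.count k) : Nat) : Int))).sum
      = ((((a : Multiset Char)) ∩ (b : Multiset Char)).card : Int) := by
  have h1 : (U.map (fun k => ((min (a.count k) (b.count k) : Nat) : Int))).sum
      = ∑ x ∈ U.toFinset, ((min (a.count x) (b.count x) : Nat) : Int) :=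
    (List.sum_toFinset (fun k => ((min (a.count k) (b.count k) : Nat) : Int)) hU).symm
  rw [h1, ← Nat.cast_sum]
  have hcnt : ∀ x : Char, min (a.count x) (b.count x)
      = (((a : Multiset Char)) ∩ (b : Multiset Char)).count x := by
    intro x
    rw [Multiset.count_inter, Multiset.coe_count, Multiset.coe_count]
  have h2 : ∑ x ∈ U.toFinset, min (a.count x) (b.count x)
      = ∑ x ∈ U.toFinset, (((a : Multiset Char)) ∩ (b : Multiset Char)).count x :=
    Finset.sum_congr rfl (fun x _ => hcnt x)
  have h3 : ∑ x ∈ U.toFinset, (((a : Multiset Char)) ∩ (b : Multiset Char)).count x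
      = ∑ x ∈ (((a : Multiset Char)) ∩ (b : Multiset Char)).toFinset,
          (((a : Multiset Char)) ∩ (b : Multiset Char)).count x := by
    refine (Finset.sum_subset ?_ ?_).symm
    · intro x hx
      have hxm := Multiset.mem_toFinset.mp hx
      have hxa : x ∈ a := by
        simpa using Multiset.mem_of_le (Multiset.inter_le_left ..) hxm
      exact List.mem_toFinset.mpr (hcov x hxa)
    · intro x _ hx
      exact Multiset.count_eq_zero.mpr (fun h => hx (Multiset.mem_toFinset.mpr h))
  rw [h2, h3, Multiset.toFinset_sum_count_eq]

theorem pv_sum_map_sub (U : List Char) (A B C : Char → Int) :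
    (U.map (fun k => A k + B k - 2 * C k)).sum
      = (U.map A).sum + (U.map B).sum - 2 * (U.map C).sum := by
  induction U with
  | nil => simp
  | cons h t ih => simp [ih]; ring

-- the L1 bag distance equals len a + len b − 2·|a ∩ b|
theorem pv_L1 (a b : List Char) :
    (((PySem.Set.ofList a)
        ++ (PySem.Set.ofList b).filter (fun k => !(PySem.Set.ofList a).contains k)).map
        (fun k => |((a.count k : Nat) : Int) - ((b.count k : Nat) : Int)|)).sum
      = (a.length : Int) + (b.length : Int)
          - 2 * ((((a : Multiset Char)) ∩ (b : Multiset Char)).card : Int) := by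
  set U : List Char :=
    (PySem.Set.ofList a)
      ++ (PySem.Set.ofList b).filter (fun k => !(PySem.Set.ofList a).contains k) with hUdef
  have hnodupU : U.Nodup := by
    rw [hUdef]
    refine List.Nodup.append (PySem.Set.nodup_ofList a)
      ((PySem.Set.nodup_ofList b).filter _) ?_
    intro x hx1 hx2
    have hxa : x ∈ a := (PySem.Set.mem_ofList a x).mp hx1
    have hcond := (List.mem_filter.mp hx2).2
    have hcontains : (PySem.Set.ofList a).contains x = true :=
      (PySem.Set.contains_iff _ _).mpr hx1
    rw [hcontains] at hcond
    simp at hcond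
  have hcova : ∀ x ∈ a, x ∈ U := by
    intro x hx
    rw [hUdef]
    exact List.mem_append.mpr (Or.inl ((PySem.Set.mem_ofList _ _).mpr hx))
  have hcovb : ∀ x ∈ b, x ∈ U := by
    intro x hx
    rw [hUdef]
    by_cases hxa : x ∈ a
    · exact List.mem_append.mpr (Or.inl ((PySem.Set.mem_ofList _ _).mpr hxa))
    · refine List.mem_append.mpr (Or.inr (List.mem_filter.mpr ⟨(PySem.Set.mem_ofList _ _).mpr hx, ?_⟩))
      have hcf : (PySem.Set.ofList a).contains x = false := by
        rcases Bool.eq_false_or_eq_true ((PySem.Set.ofList a).contains x) with h | h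
        · exact absurd ((PySem.Set.mem_ofList a x).mp ((PySem.Set.contains_iff _ _).mp h)) hxa
        · exact h
      rw [hcf]
      rfl
  have habs : ∀ (m n : Nat), |((m : Nat) : Int) - ((n : Nat) : Int)|
      = ((m : Nat) : Int) + ((n : Nat) : Int) - 2 * ((min m n : Nat) : Int) := by
    intro m n
    rcases le_total m n with h | h
    · rw [abs_of_nonpos (by omega)]
      push_cast [Nat.min_eq_left h]
      ring
    · rw [abs_of_nonneg (by omega)]
      push_cast [Nat.min_eq_right h]
      ring
  have hmapeq : (U.map (fun k => |((a.count k : Nat) : Int) - ((b.count k : Nat) : Int)|))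
      = U.map (fun k => ((a.count k : Nat) : Int) + ((b.count k : Nat) : Int)
          - 2 * ((min (a.count k) (b.count k) : Nat) : Int)) := by
    refine List.map_congr_left ?_
    intro k _
    exact habs (a.count k) (b.count k)
  rw [hmapeq, pv_sum_map_sub, pv_sum_counts U a hnodupU hcova,
      pv_sum_counts U b hnodupU hcovb, pv_sum_mins U a b hnodupU hcova]

-- B's value, in the same closed form
theorem off_by_one_letter_alt_eq (s1 s2 : String) :
    off_by_one_letter_alt s1 s2
      = decide (((pvLA s1).length : Int) + ((pvLA s2).length : Int)
          - 2 * ((((pvLA s1 : Multiset Char)) ∩ ((pvLA s2 : Multiset Char))).card : Int) ≤ 1) := by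
  unfold off_by_one_letter_alt
  rw [decide_eq_decide]
  rw [pvLA_def, pvLA_def]
  have hpa : (PySem.List.sorted (pvLA s1) (fun c => c) false).Pairwise (· ≤ ·) := by
    simpa using PySem.List.sorted_pairwise (xs := pvLA s1) (key := fun c : Char => c)
  have hpb : (PySem.List.sorted (pvLA s2) (fun c => c) false).Pairwise (· ≤ ·) := by
    simpa using PySem.List.sorted_pairwise (xs := pvLA s2) (key := fun c : Char => c)
  rw [pv_matchLoop_eq _ _ 0 hpa hpb]
  have hma : ((PySem.List.sorted (pvLA s1) (fun c => c) false : List Char) : Multiset Char)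
      = ((pvLA s1 : List Char) : Multiset Char) :=
    Multiset.coe_eq_coe.mpr (PySem.List.sorted_perm _ _ _)
  have hmb : ((PySem.List.sorted (pvLA s2) (fun c => c) false : List Char) : Multiset Char)
      = ((pvLA s2 : List Char) : Multiset Char) :=
    Multiset.coe_eq_coe.mpr (PySem.List.sorted_perm _ _ _)
  have hla : (PySem.List.sorted (pvLA s1) (fun c => c) false).length = (pvLA s1).length :=
    PySem.List.length_sorted ..
  have hlb : (PySem.List.sorted (pvLA s2) (fun c => c) false).length = (pvLA s2).length :=
    PySem.List.length_sorted ..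
  rw [hma, hmb, hla, hlb]
  omega

-- ===== VERDICT (by name: the statement is the Claim_ definition above) =====
theorem off_by_one_letter_spec : Claim_equal_off_by_one_letter := by
  intro s1 s2 _
  unfold Spec_off_by_one_letter
  rw [off_by_one_letter_eq_sum, off_by_one_letter_alt_eq, decide_eq_decide, pv_L1]
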